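-- pv_equiv track=rewrite | github.com/caio300/Project-Restaurant-Orders | src/analyze_log.py | quantity_order
-- ===== SOURCE A (Python) =====
-- def quantity_order(file, customer, item):
--     meals = {}
--     for order in file:
--         if customer in order:
--             if order[1] not in meals:
--                 meals[order[1]] = 1
--             else:
--                 meals[order[1]] += 1
--     if item in meals:
--         return meals[item]
--     return 0
-- ===== SOURCE B (Python) =====
-- def quantity_order(file, customer, item):
--     count = 0
--     for order in file:
--         if customer in order and len(order) > 1 and order[1] == item:
--             count += 1
--     return count
-- ===== Notes on version B (the rewrite author's own statement) =====
-- stated objective: simpler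
-- what changed: Replaces the dict histogram of all meals plus a post-loop lookup by a single scalar counter incremented once per matching order.
import Mathlib
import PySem

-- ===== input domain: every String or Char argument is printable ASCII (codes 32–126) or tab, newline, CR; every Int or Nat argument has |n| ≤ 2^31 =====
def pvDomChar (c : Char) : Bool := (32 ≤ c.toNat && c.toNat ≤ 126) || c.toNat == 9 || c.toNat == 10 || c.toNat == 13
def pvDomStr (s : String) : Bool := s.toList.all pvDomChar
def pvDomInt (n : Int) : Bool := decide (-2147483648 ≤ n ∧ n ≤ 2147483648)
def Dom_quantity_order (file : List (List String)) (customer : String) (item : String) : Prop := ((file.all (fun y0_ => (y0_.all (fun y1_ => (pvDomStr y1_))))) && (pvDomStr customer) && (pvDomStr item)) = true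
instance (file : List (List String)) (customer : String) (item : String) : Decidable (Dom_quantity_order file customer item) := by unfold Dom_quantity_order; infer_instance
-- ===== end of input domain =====

-- B keeps one scalar counter instead of A's dict histogram + post-loop lookup (objective: simpler).
-- ===== PORT A =====
-- A's loop body: key = order[1] (IndexError = none, excluded by Pre_; .getD "" is only reached outside Pre_).
def quantity_order (file : List (List String)) (customer : String) (item : String) : Int :=
  let meals : PySem.Dict String Int :=
    file.foldl (fun meals order =>
      if customer ∈ order then
        let k := (PySem.List.pyGet? order 1).getD ""
        if meals.contains k = false then meals.insert k 1
        else meals.insert k (meals.getD k 0 + 1)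
      else meals) PySem.Dict.empty
  if meals.contains item then meals.getD item 0 else 0

-- ===== PORT B =====
def quantity_order_alt (file : List (List String)) (customer : String) (item : String) : Int :=
  file.foldl (fun count order =>
    if customer ∈ order ∧ 1 < order.length ∧ PySem.List.pyGet? order 1 = some item
    then count + 1 else count) 0

-- ===== PRECONDITION & SPEC =====
-- Pre_ excludes exactly the inputs on which A raises IndexError: an order that contains the
-- customer but has fewer than two fields (order[1] out of range).
def Pre_quantity_order (file : List (List String)) (customer : String) (item : String) : Prop :=
  ∀ order ∈ file, customer ∈ order → 1 < order.length
instance (file : List (List String)) (customer : String) (item : String) : Decidable (Pre_quantity_order file customer item) := by unfold Pre_quantity_order; infer_instance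
def pvWitness_quantity_order : List (List String) × String × String :=
  ([["bob", "pizza"], ["ann", "soup"], ["bob", "pizza"]], "bob", "pizza")

def Spec_quantity_order (file : List (List String)) (customer : String) (item : String) (out : Int) : Prop := out = quantity_order_alt file customer item
instance (file : List (List String)) (customer : String) (item : String) (out : Int) : Decidable (Spec_quantity_order file customer item out) := by unfold Spec_quantity_order; infer_instance

-- ===== CLAIM (what is proved, stated in full; the proofs are below) =====
def Claim_equal_quantity_order : Prop := ∀ (file : List (List String)) (customer : String) (item : String), Dom_quantity_order file customer item → Pre_quantity_order file customer item → Spec_quantity_order file customer item (quantity_order file customer item)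
-- ===== LEMMAS AND PROOFS =====

-- A's loop step (as a named function for the induction).
def qoStepA (customer : String) (meals : PySem.Dict String Int) (order : List String) : PySem.Dict String Int :=
  if customer ∈ order then
    let k := (PySem.List.pyGet? order 1).getD ""
    if meals.contains k = false then meals.insert k 1
    else meals.insert k (meals.getD k 0 + 1)
  else meals

-- B's loop step.
def qoStepB (customer item : String) (count : Int) (order : List String) : Int :=
  if customer ∈ order ∧ 1 < order.length ∧ PySem.List.pyGet? order 1 = some item
  then count + 1 else count

theorem qoStepB_foldl_shift (customer item : String) (l : List (List String)) :
    ∀ c : Int, l.foldl (qoStepB customer item) c = c + l.foldl (qoStepB customer item) 0 := by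
  induction l with
  | nil => intro c; simp
  | cons order rest ih =>
    intro c
    simp only [List.foldl_cons]
    rw [ih (qoStepB customer item c order), ih (qoStepB customer item 0 order)]
    unfold qoStepB
    split_ifs <;> ring

-- Invariant: the item-count in A's dict grows exactly by B's counter increments.
theorem qo_invariant (customer item : String) (l : List (List String)) :
    ∀ d : PySem.Dict String Int,
    (∀ order ∈ l, customer ∈ order → 1 < order.length) →
    (l.foldl (qoStepA customer) d).getD item 0 =
      d.getD item 0 + l.foldl (qoStepB customer item) 0 := by
  induction l with
  | nil => intro d _; simp
  | cons order rest ih =>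
    intro d hPre
    have hrest : ∀ o ∈ rest, customer ∈ o → 1 < o.length := fun o ho => hPre o (by simp [ho])
    simp only [List.foldl_cons]
    rw [ih _ hrest]
    by_cases hc : customer ∈ order
    · have hlen : 1 < order.length := hPre order (by simp) hc
      have hv : PySem.List.pyGet? order 1 = some (order[1]'hlen) :=
        PySem.List.pyGet?_ofNat order 1 hlen
      have hstep : qoStepA customer d order = d.insert (order[1]'hlen) (d.getD (order[1]'hlen) 0 + 1) := by
        unfold qoStepA
        rw [if_pos hc]
        simp only [hv, Option.getD_some]
        by_cases hco : d.contains (order[1]'hlen) = false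
        · rw [if_pos hco, PySem.Dict.getD_of_not_contains _ _ hco]; norm_num
        · rw [if_neg hco]
      rw [hstep, PySem.Dict.getD_insert]
      by_cases hvi : item = order[1]'hlen
      · rw [if_pos hvi]
        have hB : qoStepB customer item 0 order = 1 := by
          unfold qoStepB
          rw [if_pos ⟨hc, hlen, by rw [hv, hvi]⟩]; norm_num
        rw [hB, qoStepB_foldl_shift customer item rest 1, hvi]; ring
      · rw [if_neg hvi]
        have hB : qoStepB customer item 0 order = 0 := by
          unfold qoStepB
          rw [if_neg (by rintro ⟨_, _, h⟩; rw [hv] at h; exact hvi (Option.some.inj h).symm)]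
        rw [hB]
    · have hstep : qoStepA customer d order = d := by unfold qoStepA; rw [if_neg hc]
      have hB : qoStepB customer item 0 order = 0 := by
        unfold qoStepB; rw [if_neg (by rintro ⟨h, _⟩; exact hc h)]
      rw [hstep, hB]

-- ===== VERDICT (by name: the statement is the Claim_ definition above) =====
theorem quantity_order_spec : Claim_equal_quantity_order := by
  intro file customer item _ hPre
  unfold Spec_quantity_order quantity_order quantity_order_alt
  have hfoldB : file.foldl (fun count order =>
      if customer ∈ order ∧ 1 < order.length ∧ PySem.List.pyGet? order 1 = some item
      then count + 1 else count) (0:Int) = file.foldl (qoStepB customer item) 0 := rfl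
  have hfoldA : file.foldl (fun meals order =>
      if customer ∈ order then
        let k := (PySem.List.pyGet? order 1).getD ""
        if meals.contains k = false then meals.insert k 1
        else meals.insert k (meals.getD k 0 + 1)
      else meals) PySem.Dict.empty = file.foldl (qoStepA customer) PySem.Dict.empty := rfl
  simp only [hfoldA, hfoldB]
  have h := qo_invariant customer item file PySem.Dict.empty hPre
  simp only [PySem.Dict.getD_empty, zero_add] at h
  by_cases hco : (file.foldl (qoStepA customer) PySem.Dict.empty).contains item = false
  · rw [if_neg (by simp [hco])]
    rw [PySem.Dict.getD_of_not_contains _ _ hco] at h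
    omega
  · rw [if_pos (by revert hco; cases (file.foldl (qoStepA customer) PySem.Dict.empty).contains item <;> simp)]
    exact h
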